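-- pv_equiv track=rewrite | github.com/tillbiskup/cwepr | cwepr/importers.py | _subdivide_part3
-- ===== SOURCE A (Python) =====
-- import collections as col
--
-- def _subdivide_part3(part3):
--     """Pre process the third part ("Device Specific Layer")
--      of a *.DSC file.
--
--     The crude string is split into subdivisions, which are
--     begun with a headline containing the fragment ".DVC"
--
--     Each subdivision is then transformed into a dict entry
--     with the headline, stripped of the first eight characters
--     (".DVC    ") as key and the remaining information as value.
--     Lines containing asterisks are removed.
--
--     Parameters
--     ------
--     part3: 'str'
--     Raw third part of a file.
--
--     Returns
--     ------
--     subparts_clean: 'dict'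
--     All subdivisions from the file with headlines as keys
--     and list of lines as values; lines devoid of information
--     removed.
--     """
--     lines = part3.split("\n")
--     subdivisions = col.OrderedDict()
--     current_subpart = list()
--     for line in lines:
--         if "*" in line:
--             continue
--         if ".DVC" in line and current_subpart != []:
--             if len(current_subpart) == 1:
--                 subdivisions[current_subpart[0][9:]] = []
--             else:
--                 subdivisions[current_subpart[0][9:]] = current_subpart[1:]
--             current_subpart.clear()
--         current_subpart.append(line)
--     if len(current_subpart) == 1:
--         subdivisions[current_subpart[0][9:]] = []
--     elif len(current_subpart) != 0:
--         subdivisions[current_subpart[0][9:]] = current_subpart[1:]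
--     return subdivisions
-- ===== SOURCE B (Python) =====
-- import collections as col
--
--
-- def _take_until_dvc(lines):
--     """Split lines at the first line containing ".DVC"."""
--     for k, line in enumerate(lines):
--         if ".DVC" in line:
--             return lines[:k], lines[k:]
--     return lines, []
--
--
-- def _groups(lines):
--     """Recursively cut the line list into (key, body) groups."""
--     if not lines:
--         return []
--     body, rest = _take_until_dvc(lines[1:])
--     return [(lines[0][9:], body)] + _groups(rest)
--
--
-- def _subdivide_part3(part3):
--     lines = [l for l in part3.split("\n") if "*" not in l]
--     result = col.OrderedDict()
--     for key, value in _groups(lines):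
--         result[key] = value
--     return result
-- ===== Notes on version B (the rewrite author's own statement) =====
-- stated objective: alternative
-- what changed: A builds the dict in one stateful pass with a mutable current-subpart accumulator and a duplicated end-of-loop flush; B first filters out asterisk lines, then recursively cuts the line list into (headline, body) groups at the device-headline delimiters and inserts the groups into the dict in a final pass.
import Mathlib
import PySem

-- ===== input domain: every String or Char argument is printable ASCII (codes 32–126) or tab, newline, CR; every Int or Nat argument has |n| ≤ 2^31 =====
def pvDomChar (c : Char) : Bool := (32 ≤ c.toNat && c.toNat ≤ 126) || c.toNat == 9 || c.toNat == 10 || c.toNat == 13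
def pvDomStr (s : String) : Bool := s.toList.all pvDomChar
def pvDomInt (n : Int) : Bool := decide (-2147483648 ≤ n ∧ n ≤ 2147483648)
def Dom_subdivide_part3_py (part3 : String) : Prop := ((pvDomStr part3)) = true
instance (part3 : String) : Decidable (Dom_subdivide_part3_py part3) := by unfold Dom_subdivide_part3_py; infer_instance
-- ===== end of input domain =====

-- B replaces A's single-pass accumulator loop by filter-then-recursive-grouping; objective: alternative decomposition, same value.


-- ===== PORT A =====
-- line[9:]
def pvKey9 (line : String) : String := PySem.Str.slice line (some 9) none

-- one iteration of A's for-loop over (subdivisions, current_subpart)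
def pvStepA (st : PySem.Dict String (List String) × List String) (line : String) :
    PySem.Dict String (List String) × List String :=
  if PySem.Str.isIn "*" line then st
  else
    let st' :=
      if PySem.Str.isIn ".DVC" line && !st.2.isEmpty then
        (st.1.insert (pvKey9 st.2.headI) (if st.2.length = 1 then [] else st.2.tail),
         ([] : List String))
      else st
    (st'.1, st'.2 ++ [line])

-- part3.split("\n"): split? is none only for an empty separator, and "\n" ≠ "", so getD is exact
def subdivide_part3_py (part3 : String) : List (String × List String) :=
  let lines := (PySem.Str.split? part3 "\n").getD []
  let st := lines.foldl pvStepA (PySem.Dict.empty, [])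
  let subdivisions := st.1
  let current := st.2
  if current.length = 1 then
    (subdivisions.insert (pvKey9 current.headI) []).items
  else if current.length ≠ 0 then
    (subdivisions.insert (pvKey9 current.headI) current.tail).items
  else
    subdivisions.items

-- ===== PORT B =====
-- _take_until_dvc: split lines at the first line containing ".DVC"
def pvTakeUntilDvc : List String → List String × List String
  | [] => ([], [])
  | l :: rest =>
    if PySem.Str.isIn ".DVC" l then ([], l :: rest)
    else
      let p := pvTakeUntilDvc rest
      (l :: p.1, p.2)

theorem pvTakeUntilDvc_len (ls : List String) : (pvTakeUntilDvc ls).2.length ≤ ls.length := by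
  induction ls with
  | nil => simp [pvTakeUntilDvc]
  | cons l rest ih =>
    simp only [pvTakeUntilDvc]
    split
    · simp
    · simpa using Nat.le_succ_of_le ih

-- _groups: recursively cut the line list into (key, body) groups
def pvGroups : List String → List (String × List String)
  | [] => []
  | h :: t =>
    let p := pvTakeUntilDvc t
    (pvKey9 h, p.1) :: pvGroups p.2
termination_by ls => ls.length
decreasing_by
  simpa using Nat.lt_succ_of_le (pvTakeUntilDvc_len t)

def subdivide_part3_py_alt (part3 : String) : List (String × List String) :=
  let lines := ((PySem.Str.split? part3 "\n").getD []).filter (fun l => !PySem.Str.isIn "*" l)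
  ((pvGroups lines).foldl (fun d p => d.insert p.1 p.2) PySem.Dict.empty).items

-- ===== PRECONDITION & SPEC =====
def Spec_subdivide_part3_py (part3 : String) (out : List (String × List String)) : Prop := out = subdivide_part3_py_alt part3
instance (part3 : String) (out : List (String × List String)) : Decidable (Spec_subdivide_part3_py part3 out) := by unfold Spec_subdivide_part3_py; infer_instance

-- ===== CLAIM (what is proved, stated in full; the proofs are below) =====
def Claim_equal_subdivide_part3_py : Prop := ∀ (part3 : String), Dom_subdivide_part3_py part3 → Spec_subdivide_part3_py part3 (subdivide_part3_py part3)

-- ===== LEMMAS AND PROOFS =====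

-- A's step on a line without '*'
def pvStepA' (st : PySem.Dict String (List String) × List String) (line : String) :
    PySem.Dict String (List String) × List String :=
  let st' :=
    if PySem.Str.isIn ".DVC" line && !st.2.isEmpty then
      (st.1.insert (pvKey9 st.2.headI) (if st.2.length = 1 then [] else st.2.tail),
       ([] : List String))
    else st
  (st'.1, st'.2 ++ [line])

theorem pvStepA_eq (st : PySem.Dict String (List String) × List String) (l : String) :
    pvStepA st l = if PySem.Str.isIn "*" l then st else pvStepA' st l := rfl

theorem foldl_stepA_filter (ls : List String)
    (st : PySem.Dict String (List String) × List String) :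
    ls.foldl pvStepA st = (ls.filter (fun l => !PySem.Str.isIn "*" l)).foldl pvStepA' st := by
  induction ls generalizing st with
  | nil => rfl
  | cons l ls ih =>
    rw [List.foldl_cons, pvStepA_eq, List.filter_cons]
    by_cases h : PySem.Str.isIn "*" l
    · rw [if_pos h, h]
      simp only [Bool.not_true, Bool.false_eq_true, if_false]
      exact ih st
    · have hf : PySem.Str.isIn "*" l = false := by simpa using h
      rw [if_neg h, hf]
      simp only [Bool.not_false, if_true, List.foldl_cons]
      exact ih _

theorem takeUntil_no_dvc (t : List String) (ht : ∀ x ∈ t, PySem.Str.isIn ".DVC" x = false) :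
    pvTakeUntilDvc t = (t, []) := by
  induction t with
  | nil => rfl
  | cons x t ih =>
    have hx := ht x (by simp)
    simp only [pvTakeUntilDvc, hx, Bool.false_eq_true, if_false]
    rw [ih (fun y hy => ht y (by simp [hy]))]

theorem takeUntil_append (t : List String) (l : String) (ls : List String)
    (ht : ∀ x ∈ t, PySem.Str.isIn ".DVC" x = false) (hl : PySem.Str.isIn ".DVC" l = true) :
    pvTakeUntilDvc (t ++ l :: ls) = (t, l :: ls) := by
  induction t with
  | nil => simp only [List.nil_append, pvTakeUntilDvc, hl, if_true]
  | cons x t ih =>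
    have hx := ht x (by simp)
    simp only [List.cons_append, pvTakeUntilDvc, hx, Bool.false_eq_true, if_false]
    rw [ih (fun y hy => ht y (by simp [hy]))]

theorem pvGroups_nil : pvGroups [] = [] := by
  rw [pvGroups.eq_def]

theorem pvGroups_cons (h : String) (t : List String) :
    pvGroups (h :: t) = (pvKey9 h, (pvTakeUntilDvc t).1) :: pvGroups (pvTakeUntilDvc t).2 := by
  rw [pvGroups.eq_def]

-- A's finish step for a nonempty current_subpart
theorem finishA_eq (d : PySem.Dict String (List String)) (h : String) (t : List String) :
    (if (h :: t).length = 1 then (d.insert (pvKey9 (h :: t).headI) []).items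
     else if (h :: t).length ≠ 0 then (d.insert (pvKey9 (h :: t).headI) (h :: t).tail).items
     else d.items) = (d.insert (pvKey9 h) t).items := by
  cases t <;> simp

-- main invariant: running A's filtered loop from a nonempty current whose tail has no ".DVC"
theorem main_inv (ls : List String) (d : PySem.Dict String (List String))
    (h : String) (t : List String)
    (ht : ∀ x ∈ t, PySem.Str.isIn ".DVC" x = false) :
    (let st := ls.foldl pvStepA' (d, h :: t)
     (st.1.insert (pvKey9 st.2.headI) st.2.tail).items) =
    ((pvGroups ((h :: t) ++ ls)).foldl (fun d p => d.insert p.1 p.2) d).items := by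
  induction ls generalizing d h t with
  | nil =>
    rw [List.append_nil, pvGroups_cons, takeUntil_no_dvc t ht]
    simp [pvGroups_nil]
  | cons l ls ih =>
    by_cases hl : PySem.Str.isIn ".DVC" l
    · have hstep : pvStepA' (d, h :: t) l = (d.insert (pvKey9 h) t, [l]) := by
        cases t with
        | nil => simp only [pvStepA']; rw [hl]; rfl
        | cons a b => simp only [pvStepA']; rw [hl]; rfl
      simp only [List.foldl_cons, hstep]
      have hih := ih (d.insert (pvKey9 h) t) l [] (by simp)
      simp only [List.singleton_append] at hih
      rw [hih]
      have hsplit : (h :: t) ++ l :: ls = h :: (t ++ l :: ls) := by simp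
      rw [hsplit]
      conv_rhs => rw [pvGroups_cons, takeUntil_append t l ls ht hl, List.foldl_cons]
    · have hl' : PySem.Str.isIn ".DVC" l = false := by simpa using hl
      have hstep : pvStepA' (d, h :: t) l = (d, h :: (t ++ [l])) := by
        simp only [pvStepA']; rw [hl']; rfl
      simp only [List.foldl_cons, hstep]
      have ht' : ∀ x ∈ t ++ [l], PySem.Str.isIn ".DVC" x = false := by
        intro x hx
        rcases List.mem_append.1 hx with hx | hx
        · exact ht x hx
        · simp only [List.mem_singleton] at hx; subst hx; exact hl'
      have hih := ih d h (t ++ [l]) ht'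
      rw [hih]
      simp

-- current_subpart is never empty after processing at least one line
theorem foldl_ne_nil (ls : List String) (st : PySem.Dict String (List String) × List String)
    (hst : st.2 ≠ []) : (ls.foldl pvStepA' st).2 ≠ [] := by
  induction ls generalizing st with
  | nil => exact hst
  | cons x ls ih =>
    apply ih
    simp only [pvStepA']
    split <;> simp

-- ===== VERDICT (by name: the statement is the Claim_ definition above) =====
theorem subdivide_part3_py_spec : Claim_equal_subdivide_part3_py := by
  intro part3 _
  unfold Spec_subdivide_part3_py
  simp only [subdivide_part3_py, subdivide_part3_py_alt]
  rw [foldl_stepA_filter]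
  cases hfl : ((PySem.Str.split? part3 "\n").getD []).filter (fun l => !PySem.Str.isIn "*" l) with
  | nil => simp [pvGroups_nil]
  | cons h t =>
    have hstep : pvStepA' ((PySem.Dict.empty : PySem.Dict String (List String)), []) h =
        (PySem.Dict.empty, [h]) := by
      simp only [pvStepA']; simp
    rw [List.foldl_cons, hstep]
    have hmain := main_inv t PySem.Dict.empty h [] (by simp)
    simp only [List.singleton_append] at hmain
    rw [← hmain]
    cases hst : t.foldl pvStepA' ((PySem.Dict.empty : PySem.Dict String (List String)), [h]) with
    | mk d cur =>
      cases cur with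
      | nil =>
        exact absurd (congrArg Prod.snd hst)
          (fun hc => foldl_ne_nil t (PySem.Dict.empty, [h]) (by simp) hc)
      | cons ch ct =>
        exact finishA_eq d ch ct
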